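-- pv_equiv track=rewrite | github.com/howdypierce/CalendarEventNLP | event_parser.py | remove_possessives
-- ===== SOURCE A (Python) =====
-- def remove_possessives(tok: list) -> list:
--     """Returns a POS-tagged list, collapsing the possessives"""
--     ret = []
--     for i in range(len(tok)):
--         if tok[i][1] == 'POS':
--             continue
--         if i+1 < len(tok) and tok[i+1][1] == 'POS':
--             ret.append( (tok[i][0] + "'s", tok[i][1]) )
--         else:
--             ret.append(tok[i])
--     return ret
-- ===== SOURCE B (Python) =====
-- def remove_possessives(tok: list) -> list:
--     """Returns a POS-tagged list, collapsing the possessives"""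
--     out = []
--     seen_pos = False
--     for t in reversed(tok):
--         if t[1] == 'POS':
--             seen_pos = True
--         elif seen_pos:
--             out.append((t[0] + "'s", t[1]))
--             seen_pos = False
--         else:
--             out.append(t)
--     out.reverse()
--     return out
-- ===== Notes on version B (the rewrite author's own statement) =====
-- stated objective: alternative
-- what changed: Replaces the index-based forward scan with lookahead (tok[i+1]) by a single reverse pass carrying a boolean 'seen possessive' flag, eliminating all indexing and length checks.
import Mathlib
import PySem

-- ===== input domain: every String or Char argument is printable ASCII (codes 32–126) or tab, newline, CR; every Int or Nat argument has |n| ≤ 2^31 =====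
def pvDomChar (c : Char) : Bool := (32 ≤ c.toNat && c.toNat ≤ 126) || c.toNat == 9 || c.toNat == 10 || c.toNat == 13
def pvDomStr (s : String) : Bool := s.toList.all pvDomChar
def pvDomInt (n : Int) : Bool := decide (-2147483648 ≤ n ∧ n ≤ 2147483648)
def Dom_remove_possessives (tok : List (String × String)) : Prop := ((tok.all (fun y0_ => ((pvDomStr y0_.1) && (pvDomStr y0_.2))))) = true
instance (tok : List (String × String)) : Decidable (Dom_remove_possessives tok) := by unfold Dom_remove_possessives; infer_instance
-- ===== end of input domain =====

-- B replaces A's index-based forward scan with lookahead by a reverse pass carrying a boolean flag; same O(n) cost, no indexing (alternative decomposition).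

-- ===== PORT A =====
def remove_possessives (tok : List (String × String)) : List (String × String) :=
  (PySem.List.pyRange 0 (tok.length : Int) 1).foldl
    (fun ret i =>
      if (PySem.List.pyGetD tok i ("", "")).2 == "POS" then ret
      else if decide (i + 1 < (tok.length : Int)) &&
              ((PySem.List.pyGetD tok (i + 1) ("", "")).2 == "POS") then
        ret ++ [((PySem.List.pyGetD tok i ("", "")).1 ++ "'s",
                 (PySem.List.pyGetD tok i ("", "")).2)]
      else ret ++ [PySem.List.pyGetD tok i ("", "")])
    []

-- ===== PORT B =====
def remove_possessives_alt (tok : List (String × String)) : List (String × String) :=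
  (tok.reverse.foldl
    (fun (st : Bool × List (String × String)) t =>
      if t.2 == "POS" then (true, st.2)
      else if st.1 then (false, st.2 ++ [(t.1 ++ "'s", t.2)])
      else (st.1, st.2 ++ [t]))
    (false, [])).2.reverse

-- ===== PRECONDITION & SPEC =====
def Spec_remove_possessives (tok : List (String × String)) (out : List (String × String)) : Prop := out = remove_possessives_alt tok
instance (tok : List (String × String)) (out : List (String × String)) : Decidable (Spec_remove_possessives tok out) := by unfold Spec_remove_possessives; infer_instance

-- ===== CLAIM (what is proved, stated in full; the proofs are below) =====
def Claim_equal_remove_possessives : Prop := ∀ (tok : List (String × String)), Dom_remove_possessives tok → Spec_remove_possessives tok (remove_possessives tok)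

-- ===== LEMMAS AND PROOFS =====

-- head-of-list 'is possessive' test
def pvHeadPos : List (String × String) → Bool
  | [] => false
  | u :: _ => u.2 == "POS"

-- common recursive characterisation of both ports
def pvSpec : List (String × String) → List (String × String)
  | [] => []
  | t :: rest =>
      (if t.2 == "POS" then []
       else if pvHeadPos rest then [(t.1 ++ "'s", t.2)] else [t]) ++ pvSpec rest

-- A's loop body as a per-index emitted chunk
def pvGA (tok : List (String × String)) (i : Int) : List (String × String) :=
  if (PySem.List.pyGetD tok i ("", "")).2 == "POS" then []
  else if decide (i + 1 < (tok.length : Int)) &&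
          ((PySem.List.pyGetD tok (i + 1) ("", "")).2 == "POS") then
    [((PySem.List.pyGetD tok i ("", "")).1 ++ "'s", (PySem.List.pyGetD tok i ("", "")).2)]
  else [PySem.List.pyGetD tok i ("", "")]

theorem pvFoldA (tok : List (String × String)) (l : List Int)
    (acc : List (String × String)) :
    l.foldl
      (fun ret i =>
        if (PySem.List.pyGetD tok i ("", "")).2 == "POS" then ret
        else if decide (i + 1 < (tok.length : Int)) &&
                ((PySem.List.pyGetD tok (i + 1) ("", "")).2 == "POS") then
          ret ++ [((PySem.List.pyGetD tok i ("", "")).1 ++ "'s",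
                   (PySem.List.pyGetD tok i ("", "")).2)]
        else ret ++ [PySem.List.pyGetD tok i ("", "")]) acc
      = acc ++ l.flatMap (pvGA tok) := by
  induction l generalizing acc with
  | nil => simp
  | cons i l ih =>
      simp only [List.foldl_cons, List.flatMap_cons, ih, pvGA]
      split_ifs <;> simp

theorem pvGA_shift (t : String × String) (rest : List (String × String)) (k : Nat) :
    pvGA (t :: rest) ((k : Int) + 1) = pvGA rest k := by
  have h1 : PySem.List.pyGetD (t :: rest) ((k : Int) + 1) ("", "")
      = PySem.List.pyGetD rest (k : Int) ("", "") := by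
    have : ((k : Int) + 1) = ((k + 1 : Nat) : Int) := by push_cast; ring
    rw [this, PySem.List.pyGetD_natCast, PySem.List.pyGetD_natCast]
    simp
  have h2 : PySem.List.pyGetD (t :: rest) ((k : Int) + 1 + 1) ("", "")
      = PySem.List.pyGetD rest ((k : Int) + 1) ("", "") := by
    have : ((k : Int) + 1 + 1) = ((k + 2 : Nat) : Int) := by push_cast; ring
    have h' : ((k : Int) + 1) = ((k + 1 : Nat) : Int) := by push_cast; ring
    rw [this, h', PySem.List.pyGetD_natCast, PySem.List.pyGetD_natCast]
    simp
  have h3 : ((k : Int) + 1 + 1 < ((t :: rest).length : Int))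
      ↔ ((k : Int) + 1 < (rest.length : Int)) := by
    simp only [List.length_cons, Nat.cast_add, Nat.cast_one]; omega
  simp only [pvGA, h1, h2]
  congr 1
  simp only [decide_eq_decide.mpr h3]

theorem pvGA_zero (t : String × String) (rest : List (String × String)) :
    pvGA (t :: rest) 0
      = (if t.2 == "POS" then []
         else if pvHeadPos rest then [(t.1 ++ "'s", t.2)] else [t]) := by
  cases rest with
  | nil => simp [pvGA, pvHeadPos, PySem.List.pyGetD]
  | cons u us =>
      simp [pvGA, pvHeadPos, PySem.List.pyGetD]

theorem pvA_eq_spec (tok : List (String × String)) :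
    remove_possessives tok = pvSpec tok := by
  unfold remove_possessives
  rw [pvFoldA]
  simp only [List.nil_append]
  induction tok with
  | nil => simp [pvSpec, PySem.List.pyRange_one_eq_nil]
  | cons t rest ih =>
      have hlt : (0 : Int) < ((t :: rest).length : Int) := by simp
      rw [PySem.List.pyRange_one_cons hlt]
      have hsh : PySem.List.pyRange (0 + 1) ((t :: rest).length : Int) 1
          = (PySem.List.pyRange 0 (rest.length : Int) 1).map (fun i => i + 1) := by
        rw [PySem.List.pyRange_one, PySem.List.pyRange_one]
        simp [List.map_map, Function.comp]
        omega
      rw [List.flatMap_cons, hsh, List.flatMap_map, pvGA_zero]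
      have : ∀ i ∈ PySem.List.pyRange 0 (rest.length : Int) 1,
          pvGA (t :: rest) (i + 1) = pvGA rest i := by
        intro i hi
        rw [PySem.List.mem_pyRange_one] at hi
        obtain ⟨h0, _⟩ := hi
        have : i = ((i.toNat : Nat) : Int) := by omega
        rw [this, pvGA_shift]
      rw [List.flatMap_congr this, ih, pvSpec]

theorem pvB_invariant (tok : List (String × String)) :
    tok.reverse.foldl
      (fun (st : Bool × List (String × String)) t =>
        if t.2 == "POS" then (true, st.2)
        else if st.1 then (false, st.2 ++ [(t.1 ++ "'s", t.2)])
        else (st.1, st.2 ++ [t]))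
      (false, [])
      = (pvHeadPos tok, (pvSpec tok).reverse) := by
  rw [List.foldl_reverse]
  induction tok with
  | nil => simp [pvHeadPos, pvSpec]
  | cons t rest ih =>
      rw [List.foldr_cons, ih]
      have hcons : pvHeadPos (t :: rest) = (t.2 == "POS") := rfl
      simp only [pvSpec, hcons]
      by_cases hp : (t.2 == "POS") = true
      · simp [hp]
      · by_cases hh : pvHeadPos rest = true
        · simp [hp, hh]
        · simp [hp, hh]

theorem pvB_eq_spec (tok : List (String × String)) :
    remove_possessives_alt tok = pvSpec tok := by
  unfold remove_possessives_alt
  rw [pvB_invariant]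
  simp

-- ===== VERDICT (by name: the statement is the Claim_ definition above) =====
theorem remove_possessives_spec : Claim_equal_remove_possessives := by
  intro tok _
  unfold Spec_remove_possessives
  rw [pvA_eq_spec, pvB_eq_spec]
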